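-- pv_equiv track=rewrite | github.com/sometextbtw/repository | lesson6_7.py | numb_counter
-- ===== SOURCE A (Python) =====
-- def numb_counter(numb):
--     res = []
--     length = len(numb)
--     for i in range(length):
--         left_index = (i - 1 + length) % length
--         right_index = (i + 1) % length
--         index_sum = numb[left_index] + numb[right_index]
--         res.append(index_sum)
--
--     return res
-- ===== SOURCE B (Python) =====
-- def numb_counter(numb):
--     left = numb[-1:] + numb[:-1]
--     right = numb[1:] + numb[:1]
--     return [l + r for l, r in zip(left, right)]
-- ===== Notes on version B (the rewrite author's own statement) =====
-- stated objective: idiomatic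
-- what changed: Replaces per-index modular neighbor arithmetic with two precomputed rotated copies of the list combined element-wise by zip.
import Mathlib
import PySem

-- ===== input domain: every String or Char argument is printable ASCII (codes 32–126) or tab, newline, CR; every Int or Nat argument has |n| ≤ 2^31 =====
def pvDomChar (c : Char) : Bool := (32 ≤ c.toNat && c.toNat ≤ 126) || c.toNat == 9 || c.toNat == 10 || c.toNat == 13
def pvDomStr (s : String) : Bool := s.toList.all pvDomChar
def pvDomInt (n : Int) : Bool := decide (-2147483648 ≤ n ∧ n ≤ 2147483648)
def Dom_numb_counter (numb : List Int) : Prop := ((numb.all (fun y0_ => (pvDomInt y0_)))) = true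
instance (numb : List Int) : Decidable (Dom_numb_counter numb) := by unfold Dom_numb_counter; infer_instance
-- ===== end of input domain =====

-- B replaces per-index modular neighbor arithmetic with two rotated copies combined element-wise by zip (idiomatic).

-- ===== PORT A =====
def numb_counter (numb : List Int) : List Int :=
  (PySem.List.pyRange 0 numb.length 1).foldl (fun res i =>
    let length : Int := numb.length
    let left_index := PySem.Int.mod (i - 1 + length) length
    let right_index := PySem.Int.mod (i + 1) length
    let index_sum := PySem.List.pyGetD numb left_index 0 + PySem.List.pyGetD numb right_index 0
    res ++ [index_sum]) []

-- ===== PORT B =====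
def numb_counter_alt (numb : List Int) : List Int :=
  let left := PySem.List.slice numb (some (-1)) none ++ PySem.List.slice numb none (some (-1))
  let right := PySem.List.slice numb (some 1) none ++ PySem.List.slice numb none (some 1)
  (left.zip right).map (fun p => p.1 + p.2)

-- ===== PRECONDITION & SPEC =====
def Spec_numb_counter (numb : List Int) (out : List Int) : Prop := out = numb_counter_alt numb
instance (numb : List Int) (out : List Int) : Decidable (Spec_numb_counter numb out) := by unfold Spec_numb_counter; infer_instance

-- ===== CLAIM (what is proved, stated in full; the proofs are below) =====
def Claim_equal_numb_counter : Prop := ∀ (numb : List Int), Dom_numb_counter numb → Spec_numb_counter numb (numb_counter numb)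

-- ===== LEMMAS AND PROOFS =====

theorem numb_counter_eq_map (numb : List Int) :
    numb_counter numb = (PySem.List.pyRange 0 numb.length 1).map (fun i =>
      PySem.List.pyGetD numb (PySem.Int.mod (i - 1 + numb.length) numb.length) 0 +
      PySem.List.pyGetD numb (PySem.Int.mod (i + 1) numb.length) 0) := by
  have h := PySem.List.foldl_append_singleton_eq_map (fun i : Int =>
      PySem.List.pyGetD numb (PySem.Int.mod (i - 1 + numb.length) numb.length) 0 +
      PySem.List.pyGetD numb (PySem.Int.mod (i + 1) numb.length) 0)
      (PySem.List.pyRange 0 numb.length 1) []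
  simpa [numb_counter] using h

theorem numb_counter_alt_eq (numb : List Int) :
    numb_counter_alt numb =
      ((numb.drop (numb.length - 1) ++ numb.dropLast).zip (numb.tail ++ numb.take 1)).map
        (fun p => p.1 + p.2) := by
  unfold numb_counter_alt
  rw [PySem.List.slice_from_neg_one, PySem.List.slice_to_neg_one, PySem.List.slice_from_one,
    PySem.List.slice_to numb (by norm_num)]
  norm_num

theorem numb_counter_spec_aux (numb : List Int) : numb_counter numb = numb_counter_alt numb := by
  rcases numb with _ | ⟨x, xs⟩
  · rfl
  set numb := x :: xs with hnumb
  have hn1 : 1 ≤ numb.length := by simp [hnumb]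
  rw [numb_counter_eq_map, numb_counter_alt_eq]
  apply List.ext_getElem
  · simp [PySem.List.length_pyRange_one]
    omega
  intro k h1 h2
  have hk : k < numb.length := by
    simpa [PySem.List.length_pyRange_one] using h1
  rw [List.getElem_map, List.getElem_map, PySem.List.getElem_pyRange_one, List.getElem_zip]
  have hnpos : 0 < (numb.length : Int) := by omega
  have hmod1 : PySem.Int.mod ((0 : Int) + (k : Int) - 1 + numb.length) numb.length =
      ((k : Int) - 1 + numb.length) % numb.length := by
    rw [PySem.Int.mod_eq_emod_of_pos hnpos]; ring_nf
  have hmod2 : PySem.Int.mod ((0 : Int) + (k : Int) + 1) numb.length =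
      ((k : Int) + 1) % numb.length := by
    rw [PySem.Int.mod_eq_emod_of_pos hnpos]; ring_nf
  rw [hmod1, hmod2]
  have hb1 : 0 ≤ ((k : Int) - 1 + numb.length) % numb.length ∧
      ((k : Int) - 1 + numb.length) % numb.length < (numb.length : Int) :=
    ⟨Int.emod_nonneg _ (by omega), Int.emod_lt_of_pos _ hnpos⟩
  have hb2 : 0 ≤ ((k : Int) + 1) % numb.length ∧
      ((k : Int) + 1) % numb.length < (numb.length : Int) :=
    ⟨Int.emod_nonneg _ (by omega), Int.emod_lt_of_pos _ hnpos⟩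
  rw [PySem.List.pyGetD_eq_getElem numb 0 hb1.1 hb1.2,
      PySem.List.pyGetD_eq_getElem numb 0 hb2.1 hb2.2]
  have e1 : (((k : Int) - 1 + numb.length) % numb.length).toNat =
      if k = 0 then numb.length - 1 else k - 1 := by
    by_cases h0 : k = 0
    · have hx : ((k : Int) - 1 + numb.length) % numb.length = (numb.length : Int) - 1 := by
        subst h0
        rw [show ((0 : Nat) : Int) - 1 + (numb.length : Int) = (numb.length : Int) - 1 by push_cast; ring]
        exact Int.emod_eq_of_lt (by omega) (by omega)
      rw [hx]; simp [h0]
    · have hx : ((k : Int) - 1 + numb.length) % numb.length = (k : Int) - 1 := by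
        rw [Int.add_emod_right]
        exact Int.emod_eq_of_lt (by omega) (by omega)
      rw [hx]; simp [h0]
  have e2 : (((k : Int) + 1) % numb.length).toNat =
      if k + 1 < numb.length then k + 1 else 0 := by
    by_cases hlt : k + 1 < numb.length
    · rw [Int.emod_eq_of_lt (by omega) (by omega)]
      simp [hlt]
    · rw [show ((k : Int) + 1) = (numb.length : Int) by omega, Int.emod_self]
      simp [hlt]
  by_cases h0 : k = 0
  · by_cases h2 : k + 1 < numb.length
    · simp only [show (((k : Int) - 1 + numb.length) % numb.length).toNat = numb.length - 1 by rw [e1]; simp [h0],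
          show (((k : Int) + 1) % numb.length).toNat = k + 1 by rw [e2]; simp [h2]]
      simp only [List.getElem_append]
      rw [dif_pos (show k < (numb.drop (numb.length - 1)).length by simp [List.length_drop]; omega),
          dif_pos (show k < numb.tail.length by simp [List.length_tail]; omega)]
      simp only [List.getElem_drop, List.getElem_tail]
      congr 1 <;> congr 1 <;> (first | omega | (simp only [List.length_drop, List.length_tail]; omega))
    · simp only [show (((k : Int) - 1 + numb.length) % numb.length).toNat = numb.length - 1 by rw [e1]; simp [h0],
          show (((k : Int) + 1) % numb.length).toNat = 0 by rw [e2]; simp [h2]]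
      simp only [List.getElem_append]
      rw [dif_pos (show k < (numb.drop (numb.length - 1)).length by simp [List.length_drop]; omega),
          dif_neg (show ¬ k < numb.tail.length by simp [List.length_tail]; omega)]
      simp only [List.getElem_drop, List.getElem_take]
      congr 1 <;> congr 1 <;> (first | omega | (simp only [List.length_drop, List.length_tail]; omega))
  · by_cases h2 : k + 1 < numb.length
    · simp only [show (((k : Int) - 1 + numb.length) % numb.length).toNat = k - 1 by rw [e1]; simp [h0],
          show (((k : Int) + 1) % numb.length).toNat = k + 1 by rw [e2]; simp [h2]]
      simp only [List.getElem_append]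
      rw [dif_neg (show ¬ k < (numb.drop (numb.length - 1)).length by simp [List.length_drop]; omega),
          dif_pos (show k < numb.tail.length by simp [List.length_tail]; omega)]
      simp only [List.getElem_dropLast, List.getElem_tail]
      congr 1 <;> congr 1 <;> (first | omega | (simp only [List.length_drop, List.length_tail]; omega))
    · simp only [show (((k : Int) - 1 + numb.length) % numb.length).toNat = k - 1 by rw [e1]; simp [h0],
          show (((k : Int) + 1) % numb.length).toNat = 0 by rw [e2]; simp [h2]]
      simp only [List.getElem_append]
      rw [dif_neg (show ¬ k < (numb.drop (numb.length - 1)).length by simp [List.length_drop]; omega),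
          dif_neg (show ¬ k < numb.tail.length by simp [List.length_tail]; omega)]
      simp only [List.getElem_dropLast, List.getElem_take]
      congr 1 <;> congr 1 <;> (first | omega | (simp only [List.length_drop, List.length_tail]; omega))


-- ===== VERDICT (by name: the statement is the Claim_ definition above) =====
theorem numb_counter_spec : Claim_equal_numb_counter := by
  intro numb _
  exact numb_counter_spec_aux numb
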